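-- pv_equiv track=rewrite | github.com/xreyesso/sbi_pyt_project | ligsite_together.py | determine_pockets_surface
-- ===== SOURCE A (Python) =====
-- from collections import defaultdict, deque
--
-- nearest_neighbors = [
--         (1, 0, 0), (-1, 0, 0),  # x-axis neighbors
--         (0, 1, 0), (0, -1, 0),  # y-axis neighbors
--         (0, 0, 1), (0, 0, -1)   # z-axis neighbors
--     ]
--
-- def determine_pockets_surface(voxel_grid, pockets_dict):
--     """
--     Check which voxels of each pocket are part of the surface of the pocket,
--     by checking if any of their neighbors are protein voxels
--     """
--     pockets_surface_dict = defaultdict(list)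
--
--     # Iterate through the pockets
--     for id, voxels in pockets_dict.items():
--
--         # Iterate through the voxels of each pocket
--         for voxel in voxels:
--             i, j, k = voxel
--
--             # Define is_surface as False
--             is_surface = False
--
--             # Check all the neighbors of the voxel to see if one of them is a protein
--             for direction in nearest_neighbors:
--                 di, dj, dk = direction
--                 neighbor = (i + di, j + dj, k + dk)
--
--                 # If neighbor is inside the grid and it is a protein,
--                 # the voxel we are looking at is a suface point
--                 if neighbor in voxel_grid and voxel_grid[neighbor] == -1:
--                     is_surface = True
--
--             # If the voxel is a surface point, add it to the pockets_surface_dict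
--             if is_surface:
--                 pockets_surface_dict[f'surface_{id}'].append(voxel)
--
--     return pockets_surface_dict
-- ===== SOURCE B (Python) =====
-- from collections import defaultdict
--
-- nearest_neighbors = [
--         (1, 0, 0), (-1, 0, 0),
--         (0, 1, 0), (0, -1, 0),
--         (0, 0, 1), (0, 0, -1)
--     ]
--
-- def determine_pockets_surface(voxel_grid, pockets_dict):
--     # One-time dilation of the protein voxels: every position adjacent to a
--     # protein voxel goes into one set; each pocket voxel is then a single
--     # membership test instead of a 6-neighbour probe of the grid.
--     protein_adjacent = set()
--     for key, value in voxel_grid.items():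
--         if value == -1:
--             x, y, z = key
--             for dx, dy, dz in nearest_neighbors:
--                 protein_adjacent.add((x + dx, y + dy, z + dz))
--
--     pockets_surface_dict = defaultdict(list)
--     for id, voxels in pockets_dict.items():
--         for voxel in voxels:
--             i, j, k = voxel
--             if (i, j, k) in protein_adjacent:
--                 pockets_surface_dict[f'surface_{id}'].append(voxel)
--     return pockets_surface_dict
-- ===== Notes on version B (the rewrite author's own statement) =====
-- stated objective: alternative
-- what changed: Instead of probing the grid at all 6 neighbors of every pocket voxel, B dilates the protein voxels once into a set of adjacent positions and then tests each pocket voxel by a single set membership.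
-- outside the precondition, e.g. on determine_pockets_surface({(0, 0): -1}, {'p': [[0, 0, 0]]}): A returns {}, B raises ValueError
import Mathlib
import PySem

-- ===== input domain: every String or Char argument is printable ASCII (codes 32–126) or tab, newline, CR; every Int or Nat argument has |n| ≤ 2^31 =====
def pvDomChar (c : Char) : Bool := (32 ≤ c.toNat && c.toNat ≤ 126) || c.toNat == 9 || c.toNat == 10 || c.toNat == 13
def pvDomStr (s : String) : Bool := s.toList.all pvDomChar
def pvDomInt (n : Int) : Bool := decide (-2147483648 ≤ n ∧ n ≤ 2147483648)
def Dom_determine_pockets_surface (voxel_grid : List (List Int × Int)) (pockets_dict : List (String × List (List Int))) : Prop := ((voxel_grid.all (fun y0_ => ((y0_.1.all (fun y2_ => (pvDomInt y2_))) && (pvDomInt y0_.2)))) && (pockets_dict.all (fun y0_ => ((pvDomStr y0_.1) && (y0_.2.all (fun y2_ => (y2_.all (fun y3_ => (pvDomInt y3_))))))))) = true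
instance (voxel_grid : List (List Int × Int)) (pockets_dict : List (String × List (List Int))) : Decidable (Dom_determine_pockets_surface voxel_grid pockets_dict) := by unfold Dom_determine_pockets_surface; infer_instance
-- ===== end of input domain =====

-- B replaces A's per-voxel six-neighbour probe of the grid by a one-time dilation of the
-- protein voxels into a set of adjacent positions, then one membership test per pocket voxel (objective: alternative).


-- ===== PORT A =====
def nearest_neighbors : List (Int × Int × Int) :=
  [(1, 0, 0), (-1, 0, 0), (0, 1, 0), (0, -1, 0), (0, 0, 1), (0, 0, -1)]

def determine_pockets_surface (voxel_grid : List (List Int × Int)) (pockets_dict : List (String × List (List Int))) : List (String × List (List Int)) :=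
  let grid : PySem.Dict (List Int) Int := PySem.Dict.mk voxel_grid
  let out : PySem.Dict String (List (List Int)) :=
    pockets_dict.foldl (fun acc p =>
      p.2.foldl (fun acc voxel =>
        match voxel with
        | [i, j, k] =>
          let is_surface := nearest_neighbors.foldl (fun b d =>
            let nb := [i + d.1, j + d.2.1, k + d.2.2]
            if grid.contains nb && (grid.getD nb 0 == -1) then true else b) false
          if is_surface then acc.modify ("surface_" ++ p.1) [] (· ++ [voxel]) else acc
        | _ => acc  -- Python raises ValueError here (voxel not a 3-list); excluded by Pre_
        ) acc) PySem.Dict.empty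
  out.items

-- ===== PORT B =====
def nearest_neighbors_b : List (Int × Int × Int) :=
  [(1, 0, 0), (-1, 0, 0), (0, 1, 0), (0, -1, 0), (0, 0, 1), (0, 0, -1)]

def determine_pockets_surface_alt (voxel_grid : List (List Int × Int)) (pockets_dict : List (String × List (List Int))) : List (String × List (List Int)) :=
  let protein_adjacent : PySem.Set (List Int) :=
    voxel_grid.foldl (fun s p =>
      if p.2 == -1 then
        match p.1 with
        | [x, y, z] =>
          nearest_neighbors_b.foldl (fun s d => PySem.Set.add s [x + d.1, y + d.2.1, z + d.2.2]) s
        -- Python raises ValueError on every non-3-tuple key below; excluded by Pre_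
        | [] => s | [_] => s | [_, _] => s | _ :: _ :: _ :: _ :: _ => s
      else s) PySem.Set.empty
  let out : PySem.Dict String (List (List Int)) :=
    pockets_dict.foldl (fun acc p =>
      p.2.foldl (fun acc voxel =>
        match voxel with
        | [] => acc | [_] => acc | [_, _] => acc  -- Python raises ValueError on these; excluded by Pre_
        | [i, j, k] =>
          if protein_adjacent.contains [i, j, k] then acc.modify ("surface_" ++ p.1) [] (· ++ [voxel]) else acc
        | _ :: _ :: _ :: _ :: _ => acc  -- Python raises ValueError here; excluded by Pre_
        ) acc) PySem.Dict.empty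
  out.items

-- ===== PRECONDITION & SPEC =====
-- Pre_ requires: (a) both association lists have distinct keys (a duplicate-keyed list represents
-- no Python dict); (b) every pocket voxel is a 3-list (otherwise A itself raises ValueError);
-- (c) every protein (-1) grid key is a 3-tuple — there A returns an empty result (such a key can
-- never equal a length-3 neighbour tuple) while B's own coordinate unpacking raises ValueError.
def Pre_determine_pockets_surface (voxel_grid : List (List Int × Int)) (pockets_dict : List (String × List (List Int))) : Prop :=
  (voxel_grid.map Prod.fst).Nodup ∧ (pockets_dict.map Prod.fst).Nodup ∧
  (∀ p ∈ voxel_grid, p.2 = -1 → p.1.length = 3) ∧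
  (∀ q ∈ pockets_dict, ∀ v ∈ q.2, v.length = 3)
instance (voxel_grid : List (List Int × Int)) (pockets_dict : List (String × List (List Int))) : Decidable (Pre_determine_pockets_surface voxel_grid pockets_dict) := by unfold Pre_determine_pockets_surface; infer_instance

def pvWitness_determine_pockets_surface : (List (List Int × Int)) × (List (String × List (List Int))) :=
  ([([0, 0, 0], -1), ([1, 0, 0], 1)], [("p1", [[0, 1, 0], [2, 2, 2]])])

def Spec_determine_pockets_surface (voxel_grid : List (List Int × Int)) (pockets_dict : List (String × List (List Int))) (out : List (String × List (List Int))) : Prop := out = determine_pockets_surface_alt voxel_grid pockets_dict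
instance (voxel_grid : List (List Int × Int)) (pockets_dict : List (String × List (List Int))) (out : List (String × List (List Int))) : Decidable (Spec_determine_pockets_surface voxel_grid pockets_dict out) := by unfold Spec_determine_pockets_surface; infer_instance

-- ===== CLAIM (what is proved, stated in full; the proofs are below) =====
def Claim_equal_determine_pockets_surface : Prop := ∀ (voxel_grid : List (List Int × Int)) (pockets_dict : List (String × List (List Int))), Dom_determine_pockets_surface voxel_grid pockets_dict → Pre_determine_pockets_surface voxel_grid pockets_dict → Spec_determine_pockets_surface voxel_grid pockets_dict (determine_pockets_surface voxel_grid pockets_dict)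


-- ===== LEMMAS AND PROOFS =====


lemma foldl_or_if {α : Type} (l : List α) (c : α → Bool) (b : Bool) :
    l.foldl (fun b d => if c d then true else b) b = (b || l.any c) := by
  induction l generalizing b with
  | nil => simp
  | cons x xs ih =>
    simp only [List.foldl_cons, List.any_cons, ih]
    by_cases h : c x <;> simp [h]

lemma probe_eq (d : PySem.Dict (List Int) Int) (nb : List Int) :
    (d.contains nb && (d.getD nb 0 == -1)) = true ↔ d.get? nb = some (-1) := by
  rw [PySem.Dict.contains_eq_isSome_get?, PySem.Dict.getD_eq_get?_getD]
  cases h : d.get? nb <;> simp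

lemma dirs_symm : ∀ d ∈ nearest_neighbors, (-d.1, -d.2.1, -d.2.2) ∈ nearest_neighbors_b := by decide

lemma dirs_symm' : ∀ d ∈ nearest_neighbors_b, (-d.1, -d.2.1, -d.2.2) ∈ nearest_neighbors := by decide

lemma mem_adj (l : List (List Int × Int)) (h3 : ∀ p ∈ l, p.2 = -1 → p.1.length = 3)
    (s : PySem.Set (List Int)) (q : List Int) :
    q ∈ l.foldl (fun s p =>
      if p.2 == -1 then
        match p.1 with
        | [x, y, z] =>
          nearest_neighbors_b.foldl (fun s d => PySem.Set.add s [x + d.1, y + d.2.1, z + d.2.2]) s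
        | [] => s | [_] => s | [_, _] => s | _ :: _ :: _ :: _ :: _ => s
      else s) s ↔
    q ∈ s ∨ ∃ p ∈ l, p.2 = -1 ∧ ∃ x y z, p.1 = [x, y, z] ∧
      ∃ d ∈ nearest_neighbors_b, q = [x + d.1, y + d.2.1, z + d.2.2] := by
  induction l generalizing s with
  | nil => simp
  | cons p rest ih =>
    have h3' : ∀ p ∈ rest, p.2 = -1 → p.1.length = 3 := fun p hp => h3 p (List.mem_cons_of_mem _ hp)
    simp only [List.foldl_cons]
    rw [ih h3']
    by_cases hp : p.2 = -1
    · have hlen := h3 p (List.mem_cons_self ..) hp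
      obtain ⟨x, y, z, hxyz⟩ : ∃ x y z, p.1 = [x, y, z] := by
        rcases hk : p.1 with _ | ⟨a, _ | ⟨b, _ | ⟨c, _ | ⟨e, t⟩⟩⟩⟩ <;> simp [hk] at hlen ⊢
      simp only [hp, hxyz, beq_self_eq_true, if_true]
      rw [PySem.Set.mem_foldl_add]
      constructor
      · rintro (⟨hq | ⟨d, hd, rfl⟩⟩ | hrest)
        · exact Or.inl hq
        · exact Or.inr ⟨p, List.mem_cons_self .., hp, x, y, z, hxyz, d, hd, rfl⟩
        · rcases hrest with ⟨p', hp', h⟩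
          exact Or.inr ⟨p', List.mem_cons_of_mem _ hp', h⟩
      · rintro (hq | ⟨p', hp', hneg, x', y', z', hxyz', d, hd, rfl⟩)
        · exact Or.inl (Or.inl hq)
        · rcases List.mem_cons.mp hp' with rfl | hp'
          · rw [hxyz] at hxyz'
            obtain ⟨rfl, rfl, rfl⟩ : x' = x ∧ y' = y ∧ z' = z := by
              simpa using hxyz'.symm
            exact Or.inl (Or.inr ⟨d, hd, rfl⟩)
          · exact Or.inr ⟨p', hp', hneg, x', y', z', hxyz', d, hd, rfl⟩
    · have : (p.2 == -1) = false := by simpa using hp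
      simp only [this, Bool.false_eq_true, if_false]
      constructor
      · rintro (hq | ⟨p', hp', h⟩)
        · exact Or.inl hq
        · exact Or.inr ⟨p', List.mem_cons_of_mem _ hp', h⟩
      · rintro (hq | ⟨p', hp', h⟩)
        · exact Or.inl hq
        · rcases List.mem_cons.mp hp' with rfl | hp'
          · exact absurd h.1 hp
          · exact Or.inr ⟨p', hp', h⟩

lemma surface_eq (vg : List (List Int × Int)) (hnd : (vg.map Prod.fst).Nodup)
    (h3 : ∀ p ∈ vg, p.2 = -1 → p.1.length = 3) (i j k : Int) :
    nearest_neighbors.foldl (fun b d =>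
        if (PySem.Dict.mk vg).contains [i + d.1, j + d.2.1, k + d.2.2] &&
            ((PySem.Dict.mk vg).getD [i + d.1, j + d.2.1, k + d.2.2] 0 == -1) then true else b) false
    = PySem.Set.contains (vg.foldl (fun s p =>
        if p.2 == -1 then
          match p.1 with
          | [x, y, z] =>
            nearest_neighbors_b.foldl (fun s d => PySem.Set.add s [x + d.1, y + d.2.1, z + d.2.2]) s
          | [] => s | [_] => s | [_, _] => s | _ :: _ :: _ :: _ :: _ => s
        else s) PySem.Set.empty) [i, j, k] := by
  have hnd' : (PySem.Dict.mk vg).keys.Nodup := hnd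
  rw [Bool.eq_iff_iff, foldl_or_if, Bool.false_or, List.any_eq_true]
  have hmem := mem_adj vg h3 PySem.Set.empty [i, j, k]
  constructor
  · rintro ⟨d, hd, hc⟩
    rw [probe_eq] at hc
    have hin : ([i + d.1, j + d.2.1, k + d.2.2], (-1 : Int)) ∈ vg :=
      (PySem.Dict.get?_eq_some_iff_mem_items _ _ _ hnd').mp hc
    have := hmem.mpr (Or.inr ⟨_, hin, rfl, i + d.1, j + d.2.1, k + d.2.2, rfl,
        (-d.1, -d.2.1, -d.2.2), dirs_symm d hd, by simp⟩)
    simpa [PySem.Set.contains] using this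
  · intro hc
    have hm := hmem.mp (by simpa [PySem.Set.contains] using hc)
    rcases hm with h | ⟨p, hp, hneg, x, y, z, hxyz, d, hd, hq⟩
    · simp at h
    · refine ⟨(-d.1, -d.2.1, -d.2.2), dirs_symm' d hd, ?_⟩
      rw [probe_eq]
      have heq : [i + -d.1, j + -d.2.1, k + -d.2.2] = [x, y, z] := by
        simp at hq; simp; omega
      rw [heq, PySem.Dict.get?_eq_some_iff_mem_items _ _ _ hnd']
      have : p = ([x, y, z], -1) := by rw [← hxyz, ← hneg]
      rwa [this] at hp

theorem determine_pockets_surface_spec : Claim_equal_determine_pockets_surface := by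
  intro vg pd _dom hpre
  obtain ⟨hnd1, _hnd2, h3, _hv3⟩ := hpre
  unfold Spec_determine_pockets_surface
  simp only [determine_pockets_surface, determine_pockets_surface_alt]
  congr 1
  apply List.foldl_ext
  intro acc p _hp
  apply List.foldl_ext
  intro acc' voxel _hv
  rcases voxel with _ | ⟨i, _ | ⟨j, _ | ⟨k, _ | ⟨m, t⟩⟩⟩⟩ <;> try rfl
  simp only [surface_eq vg hnd1 h3]
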